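-- pv_equiv track=rewrite | github.com/wooftrill/cart | wt_cart/utils/HelperUtils.py | create_combine_list
-- ===== SOURCE A (Python) =====
-- def create_combine_list(list_name):
--     count_dict = {}
--
--     for data in list_name:
--         item = data["item_id"]
--         count = data["count"]
--         count_dict[item] = count_dict.get(item, 0) + count
--
--     result_list = [{"item_id": item, "count": count} for item, count in count_dict.items()]
--
--     return result_list
-- ===== SOURCE B (Python) =====
-- def create_combine_list(list_name):
--     result_list = []
--     remaining = list_name
--     while remaining:
--         item = remaining[0]["item_id"]
--         total = 0
--         rest = []
--         for data in remaining:
--             if data["item_id"] == item: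
--                 total += data["count"]
--             else:
--                 rest.append(data)
--         result_list.append({"item_id": item, "count": total})
--         remaining = rest
--     return result_list
-- ===== Notes on version B (the rewrite author's own statement) =====
-- stated objective: alternative
-- what changed: B uses no dict at all: a repeated-partition (group-by-filtering) algorithm that takes the first remaining record's item_id, sums all its counts while partitioning the remaining records into matching and non-matching in one pass, emits the combined record, and repeats on the non-matching remainder.
import Mathlib
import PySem

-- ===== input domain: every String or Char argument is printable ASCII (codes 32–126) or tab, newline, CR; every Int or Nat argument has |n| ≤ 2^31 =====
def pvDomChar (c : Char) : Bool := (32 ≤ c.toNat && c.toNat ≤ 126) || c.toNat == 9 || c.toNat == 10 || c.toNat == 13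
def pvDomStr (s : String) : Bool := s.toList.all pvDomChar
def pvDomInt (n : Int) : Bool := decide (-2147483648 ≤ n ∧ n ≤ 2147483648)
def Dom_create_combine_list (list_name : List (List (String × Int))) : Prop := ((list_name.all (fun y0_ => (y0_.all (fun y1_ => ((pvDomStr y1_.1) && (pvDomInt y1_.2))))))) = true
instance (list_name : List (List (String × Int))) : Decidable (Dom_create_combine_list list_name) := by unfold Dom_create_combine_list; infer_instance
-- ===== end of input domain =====

-- B replaces A's count-dict-then-rebuild with a dict-free repeated-partition (group-by-filtering)
-- algorithm; equivalence of the return values is proved on records carrying both keys.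

-- ===== PORT A =====
-- count_dict[item] = count_dict.get(item, 0) + count, looped over list_name
def pvStepA (d : PySem.Dict Int Int) (data : List (String × Int)) : PySem.Dict Int Int :=
  match (PySem.Dict.mk data).get? "item_id", (PySem.Dict.mk data).get? "count" with
  | some item, some count => d.insert item (d.getD item 0 + count)
  | _, _ => d  -- Python raises KeyError here; excluded by Pre_

def create_combine_list (list_name : List (List (String × Int))) : List (List (String × Int)) :=
  let count_dict := list_name.foldl pvStepA PySem.Dict.empty
  count_dict.items.map (fun p => [("item_id", p.1), ("count", p.2)])

-- ===== PORT B =====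
-- the inner partition loop over `remaining`: accumulate (total, rest)
def pvPartStep (item : Int) (acc : Int × List (List (String × Int))) (data : List (String × Int)) :
    Int × List (List (String × Int)) :=
  match (PySem.Dict.mk data).get? "item_id" with
  | some i =>
    if i == item then (acc.1 + (PySem.Dict.mk data).getD "count" 0, acc.2)
    else (acc.1, acc.2 ++ [data])
  | none => acc  -- Python raises KeyError at data["item_id"]; excluded by Pre_

-- the partition never puts more records into `rest` than it reads (used for termination)
theorem pvPartStep_len (item : Int) (l : List (List (String × Int)))
    (acc : Int × List (List (String × Int))) :
    (l.foldl (pvPartStep item) acc).2.length ≤ acc.2.length + l.length := by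
  induction l generalizing acc with
  | nil => simp
  | cons d t ih =>
    refine le_trans (ih _) ?_
    unfold pvPartStep
    rcases (PySem.Dict.mk d).get? "item_id" with _ | i
    · simp
    · by_cases h : (i == item) = true <;> simp [h]
      omega

-- the outer while loop: emit the combined record for the first item_id, repeat on the rest
def create_combine_list_alt : List (List (String × Int)) → List (List (String × Int))
  | [] => []
  | d :: t =>
    match h : (PySem.Dict.mk d).get? "item_id" with
    | none => []  -- Python raises KeyError at remaining[0]["item_id"]; excluded by Pre_
    | some item =>
      [("item_id", item), ("count", ((d :: t).foldl (pvPartStep item) (0, [])).1)] ::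
        create_combine_list_alt ((d :: t).foldl (pvPartStep item) (0, [])).2
termination_by l => l.length
decreasing_by
  simp only [List.foldl_cons, pvPartStep, h, BEq.rfl, if_true]
  have := pvPartStep_len item t ((0 : Int) + (PySem.Dict.mk d).getD "count" 0, [])
  simp at this
  simp
  omega

-- ===== PRECONDITION & SPEC =====
-- Pre_ excludes exactly the records missing an "item_id" or "count" key, on which Python A raises KeyError.
def Pre_create_combine_list (list_name : List (List (String × Int))) : Prop :=
  ∀ data ∈ list_name, (PySem.Dict.mk data).contains "item_id" = true ∧ (PySem.Dict.mk data).contains "count" = true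
instance (list_name : List (List (String × Int))) : Decidable (Pre_create_combine_list list_name) := by unfold Pre_create_combine_list; infer_instance
def pvWitness_create_combine_list : (List (List (String × Int))) :=
  [[("item_id", 1), ("count", 2)], [("item_id", 1), ("count", 3)], [("item_id", 4), ("count", 5)]]

def Spec_create_combine_list (list_name : List (List (String × Int))) (out : List (List (String × Int))) : Prop := out = create_combine_list_alt list_name
instance (list_name : List (List (String × Int))) (out : List (List (String × Int))) : Decidable (Spec_create_combine_list list_name out) := by unfold Spec_create_combine_list; infer_instance

-- ===== CLAIM (what is proved, stated in full; the proofs are below) =====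
def Claim_equal_create_combine_list : Prop := ∀ (list_name : List (List (String × Int))), Dom_create_combine_list list_name → Pre_create_combine_list list_name → Spec_create_combine_list list_name (create_combine_list list_name)

-- ===== LEMMAS AND PROOFS =====

-- proof-side abbreviations
def pvId (d : List (String × Int)) : Option Int := (PySem.Dict.mk d).get? "item_id"
def pvCnt (d : List (String × Int)) : Int := (PySem.Dict.mk d).getD "count" 0
def pvToRec (p : Int × Int) : List (String × Int) := [("item_id", p.1), ("count", p.2)]
-- total count of key k over a record list
def pvS (k : Int) (l : List (List (String × Int))) : Int :=
  ((l.filter (fun d => pvId d == some k)).map pvCnt).sum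
-- the records B's partition keeps for the next round
def pvKeep (j : Int) (d : List (String × Int)) : Bool :=
  match pvId d with
  | some i => !(i == j)
  | none => false
-- first-appearance keys not yet seen
def pvNewKeys (seen : List Int) : List (List (String × Int)) → List Int
  | [] => []
  | d :: t =>
    match pvId d with
    | none => pvNewKeys seen t
    | some k => if k ∈ seen then pvNewKeys seen t else k :: pvNewKeys (k :: seen) t

theorem pvS_nil (k : Int) : pvS k [] = 0 := rfl

theorem pvS_cons (k : Int) (d : List (String × Int)) (t : List (List (String × Int))) :
    pvS k (d :: t) = (if pvId d == some k then pvCnt d else 0) + pvS k t := by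
  simp only [pvS, List.filter_cons]
  split <;> simp_all

theorem pvNewKeys_not_mem_seen (seen : List Int) (l : List (List (String × Int))) (k : Int)
    (hk : k ∈ pvNewKeys seen l) : k ∉ seen := by
  induction l generalizing seen with
  | nil => simp [pvNewKeys] at hk
  | cons d t ih =>
    rcases hid : pvId d with _ | j <;> simp only [pvNewKeys, hid] at hk
    · exact ih seen hk
    · by_cases hj : j ∈ seen
      · rw [if_pos hj] at hk; exact ih seen hk
      · rw [if_neg hj] at hk
        rcases List.mem_cons.mp hk with rfl | hk'
        · exact hj
        · intro hks; exact ih (j :: seen) hk' (List.mem_cons_of_mem _ hks)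

theorem pvNewKeys_mem_id (seen : List Int) (l : List (List (String × Int))) (k : Int)
    (hk : k ∈ pvNewKeys seen l) : ∃ d ∈ l, pvId d = some k := by
  induction l generalizing seen with
  | nil => simp [pvNewKeys] at hk
  | cons d t ih =>
    rcases hid : pvId d with _ | j <;> simp only [pvNewKeys, hid] at hk
    · obtain ⟨e, he, h⟩ := ih seen hk; exact ⟨e, List.mem_cons_of_mem _ he, h⟩
    · by_cases hj : j ∈ seen
      · rw [if_pos hj] at hk
        obtain ⟨e, he, h⟩ := ih seen hk; exact ⟨e, List.mem_cons_of_mem _ he, h⟩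
      · rw [if_neg hj] at hk
        rcases List.mem_cons.mp hk with rfl | hk'
        · exact ⟨d, List.mem_cons_self, hid⟩
        · obtain ⟨e, he, h⟩ := ih (j :: seen) hk'; exact ⟨e, List.mem_cons_of_mem _ he, h⟩

theorem pvNewKeys_congr (s₁ s₂ : List Int) (h : ∀ x, x ∈ s₁ ↔ x ∈ s₂)
    (l : List (List (String × Int))) : pvNewKeys s₁ l = pvNewKeys s₂ l := by
  induction l generalizing s₁ s₂ with
  | nil => rfl
  | cons d t ih =>
    rcases hid : pvId d with _ | j <;> simp only [pvNewKeys, hid]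
    · exact ih _ _ h
    · by_cases hj : j ∈ s₁
      · rw [if_pos hj, if_pos ((h j).mp hj)]; exact ih _ _ h
      · rw [if_neg hj, if_neg (fun hc => hj ((h j).mpr hc))]
        congr 1
        refine ih _ _ (fun x => ?_)
        simp [h x]

theorem pvNewKeys_filter (k : Int) (l : List (List (String × Int))) :
    ∀ seen, pvNewKeys (k :: seen) l = pvNewKeys seen (l.filter (pvKeep k)) := by
  induction l with
  | nil => intro seen; rfl
  | cons d t ih =>
    intro seen
    rcases hid : pvId d with _ | j
    · have hkeep : pvKeep k d = false := by simp [pvKeep, hid]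
      simp only [pvNewKeys, hid, List.filter_cons, hkeep]
      exact ih seen
    · by_cases hjk : j = k
      · subst hjk
        have hkeep : pvKeep j d = false := by simp [pvKeep, hid]
        simp only [pvNewKeys, hid, List.filter_cons, hkeep, if_pos (List.mem_cons_self)]
        exact ih seen
      · have hkeep : pvKeep k d = true := by simp [pvKeep, hid, hjk]
        have hmem : (j ∈ k :: seen) ↔ (j ∈ seen) := by simp [hjk]
        simp only [pvNewKeys, hid, List.filter_cons, hkeep, if_true]
        by_cases hj : j ∈ seen
        · rw [if_pos (hmem.mpr hj), if_pos hj]; exact ih seen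
        · rw [if_neg (fun hc => hj (hmem.mp hc)), if_neg hj]
          congr 1
          rw [pvNewKeys_congr (j :: k :: seen) (k :: j :: seen) (by intro x; simp; tauto)]
          exact ih (j :: seen)

theorem pvS_filter (k j : Int) (h : k ≠ j) (l : List (List (String × Int))) :
    pvS k (l.filter (pvKeep j)) = pvS k l := by
  induction l with
  | nil => rfl
  | cons d t ih =>
    rcases hid : pvId d with _ | i
    · have hkeep : pvKeep j d = false := by simp [pvKeep, hid]
      rw [List.filter_cons, if_neg (by simp [hkeep]), ih, pvS_cons, hid]
      simp
    · by_cases hij : i = j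
      · subst hij
        have hkeep : pvKeep i d = false := by simp [pvKeep, hid]
        rw [List.filter_cons, if_neg (by simp [hkeep]), ih, pvS_cons, hid]
        have : (some i == some k) = false := by simp [Ne.symm h]
        simp [this]
      · have hkeep : pvKeep j d = true := by simp [pvKeep, hid, hij]
        rw [List.filter_cons, if_pos (by simp [hkeep]), pvS_cons, pvS_cons, hid, ih]

-- the partition loop computes (acc.1 + total of item, acc.2 ++ the non-matching records)
theorem pvPart_spec (item : Int) (l : List (List (String × Int))) :
    ∀ acc, l.foldl (pvPartStep item) acc = (acc.1 + pvS item l, acc.2 ++ l.filter (pvKeep item)) := by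
  induction l with
  | nil => intro acc; simp [pvS_nil]
  | cons d t ih =>
    intro acc
    rw [List.foldl_cons, ih, pvS_cons, List.filter_cons]
    rcases hid : pvId d with _ | i
    · have hstep : pvPartStep item acc d = acc := by
        simp only [pvPartStep]
        simp only [pvId] at hid
        rw [hid]
      have hkeep : pvKeep item d = false := by simp [pvKeep, hid]
      rw [hstep]
      simp [hid, hkeep]
    · have hkeep : pvKeep item d = !(i == item) := by simp [pvKeep, hid]
      have hstep : pvPartStep item acc d =
          if i == item then (acc.1 + pvCnt d, acc.2) else (acc.1, acc.2 ++ [d]) := by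
        simp only [pvPartStep, pvCnt]
        simp only [pvId] at hid
        rw [hid]
      rw [hstep, hkeep]
      by_cases hii : i = item
      · subst hii
        simp [hid, add_assoc]
      · have hb : (i == item) = false := by simp [hii]
        simp [hb]

-- A's dict loop, characterised: existing entries gain their total, new first-appearance keys append
theorem pvFoldA (l : List (List (String × Int)))
    (hwf : ∀ d ∈ l, ((PySem.Dict.mk d).get? "item_id").isSome ∧ ((PySem.Dict.mk d).get? "count").isSome) :
    ∀ D : PySem.Dict Int Int, D.keys.Nodup →
      (l.foldl pvStepA D).items =
        D.items.map (fun p => (p.1, p.2 + pvS p.1 l)) ++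
          (pvNewKeys D.keys l).map (fun k => (k, pvS k l)) := by
  induction l with
  | nil =>
    intro D _
    simp [pvNewKeys, pvS_nil]
  | cons d t ih =>
    intro D hnd
    obtain ⟨hid', hcnt'⟩ := hwf d List.mem_cons_self
    obtain ⟨k, hid⟩ := Option.isSome_iff_exists.mp hid'
    obtain ⟨c, hcnt⟩ := Option.isSome_iff_exists.mp hcnt'
    have hwt : ∀ e ∈ t, ((PySem.Dict.mk e).get? "item_id").isSome ∧ ((PySem.Dict.mk e).get? "count").isSome :=
      fun e he => hwf e (List.mem_cons_of_mem _ he)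
    have hcntv : pvCnt d = c := by
      simp only [pvCnt]
      exact PySem.Dict.getD_of_get?_eq_some _ 0 hcnt
    have hidv : pvId d = some k := hid
    rw [List.foldl_cons]
    have hstep : pvStepA D d = D.insert k (D.getD k 0 + c) := by
      unfold pvStepA; rw [hid, hcnt]
    rw [hstep]
    by_cases hck : D.contains k = true
    · have hkeys : (D.insert k (D.getD k 0 + c)).keys = D.keys :=
        PySem.Dict.keys_insert_of_contains D _ hck
      rw [ih hwt _ (PySem.Dict.nodup_keys_insert _ _ _ hnd),
          PySem.Dict.items_insert_of_contains D _ hck, hkeys, List.map_map]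
      have hmemk : k ∈ D.keys := (PySem.Dict.contains_iff_mem_keys D k).mp hck
      congr 1
      · apply List.map_congr_left
        rintro ⟨p1, p2⟩ hp
        simp only [Function.comp]
        by_cases hpk : (p1 == k) = true
        · have hpk' : p1 = k := by simpa using hpk
          subst hpk'
          have hv : D.getD p1 0 = p2 := PySem.Dict.getD_of_mem_items D hp hnd 0
          rw [if_pos hpk, pvS_cons, hidv, hv]
          simp [hcntv, add_assoc]
        · have hpk' : p1 ≠ k := by simpa using hpk
          rw [if_neg hpk, pvS_cons, hidv]
          have : (some k == some p1) = false := by simp [Ne.symm hpk']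
          simp [this]
      · have hnk : pvNewKeys D.keys (d :: t) = pvNewKeys D.keys t := by
          simp only [pvNewKeys, hidv, if_pos hmemk]
        rw [hnk]
        apply List.map_congr_left
        intro k' hk'
        have hne : k' ≠ k := fun hc => pvNewKeys_not_mem_seen _ _ _ hk' (hc ▸ hmemk)
        rw [pvS_cons, hidv]
        have : (some k == some k') = false := by simp [Ne.symm hne]
        simp [this]
    · have hck' : D.contains k = false := by simpa using hck
      have hv0 : D.getD k 0 = 0 := PySem.Dict.getD_of_not_contains D 0 hck'
      have hkeys : (D.insert k (D.getD k 0 + c)).keys = D.keys ++ [k] :=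
        PySem.Dict.keys_insert_of_not_contains D _ hck'
      have hnmem : k ∉ D.keys := fun hc => by
        rw [(PySem.Dict.contains_iff_mem_keys D k).mpr hc] at hck'; simp at hck'
      rw [ih hwt _ (PySem.Dict.nodup_keys_insert _ _ _ hnd),
          PySem.Dict.items_insert_of_not_contains D _ hck', hkeys, List.map_append]
      have hnk : pvNewKeys D.keys (d :: t) = k :: pvNewKeys (k :: D.keys) t := by
        simp only [pvNewKeys, hidv, if_neg hnmem]
      rw [hnk,
          pvNewKeys_congr (D.keys ++ [k]) (k :: D.keys) (by intro x; simp; tauto) t]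
      have htail : (pvNewKeys (k :: D.keys) t).map (fun k' => (k', pvS k' t)) =
          (pvNewKeys (k :: D.keys) t).map (fun k' => (k', pvS k' (d :: t))) := by
        apply List.map_congr_left
        intro k' hk'
        have hne : k' ≠ k := by
          have := pvNewKeys_not_mem_seen _ _ _ hk'
          simp at this; exact fun hc => this.1 hc
        rw [pvS_cons, hidv]
        have hb : (some k == some k') = false := by simp [Ne.symm hne]
        simp [hb]
      have hhead : pvS k (d :: t) = 0 + c + pvS k t := by
        rw [pvS_cons, hidv, hcntv]; simp
      rw [List.append_assoc, htail, hv0]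
      simp only [List.map_cons]
      rw [hhead]
      congr 1
      · apply List.map_congr_left
        intro p hp
        have hpk : p.1 ≠ k := fun hc =>
          hnmem (hc ▸ List.mem_map.mpr ⟨p, hp, rfl⟩)
        rw [pvS_cons, hidv]
        have hb : (some k == some p.1) = false := by simp [Ne.symm hpk]
        simp [hb]

-- B's repeated partition, characterised by the same canonical form
theorem pvAltEq (n : Nat) : ∀ l : List (List (String × Int)), l.length ≤ n →
    (∀ d ∈ l, ((PySem.Dict.mk d).get? "item_id").isSome) →
    create_combine_list_alt l = ((pvNewKeys [] l).map (fun k => (k, pvS k l))).map pvToRec := by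
  induction n with
  | zero =>
    intro l hl _
    have : l = [] := List.eq_nil_of_length_eq_zero (Nat.le_zero.mp hl)
    subst this
    simp [create_combine_list_alt, pvNewKeys]
  | succ n ih =>
    intro l hl hwf
    match l with
    | [] => simp [create_combine_list_alt, pvNewKeys]
    | d :: t =>
      obtain ⟨k, hid⟩ := Option.isSome_iff_exists.mp (hwf d List.mem_cons_self)
      rw [create_combine_list_alt]
      split
      next h => rw [hid] at h; exact absurd h (by simp)
      next item h =>
      rw [hid] at h
      injection h with hki
      subst hki
      have hpart := pvPart_spec k (d :: t) (0, [])
      have hkeep : pvKeep k d = false := by simp [pvKeep, pvId, hid]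
      have hrest : ((d :: t).foldl (pvPartStep k) (0, [])).2 = t.filter (pvKeep k) := by
        rw [hpart]; simp [hkeep]
      have htot : ((d :: t).foldl (pvPartStep k) (0, [])).1 = pvS k (d :: t) := by
        rw [hpart]; simp
      rw [hrest, htot]
      have hlen : (t.filter (pvKeep k)).length ≤ n := by
        have := List.length_filter_le (pvKeep k) t
        simp at hl; omega
      have hwf' : ∀ e ∈ t.filter (pvKeep k), ((PySem.Dict.mk e).get? "item_id").isSome :=
        fun e he => hwf e (List.mem_cons_of_mem _ (List.mem_of_mem_filter he))
      rw [ih _ hlen hwf']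
      have hnk : pvNewKeys [] (d :: t) = k :: pvNewKeys [] (t.filter (pvKeep k)) := by
        simp only [pvNewKeys, pvId, hid, if_neg (List.not_mem_nil)]
        rw [pvNewKeys_filter]
      rw [hnk]
      simp only [List.map_cons, pvToRec]
      congr 1
      rw [List.map_map, List.map_map]
      apply List.map_congr_left
      intro k' hk'
      obtain ⟨e, he, hide⟩ := pvNewKeys_mem_id _ _ _ hk'
      have hke : pvKeep k e = true := List.of_mem_filter he
      have hne : k' ≠ k := by
        intro hc; subst hc
        simp [pvKeep, hide] at hke
      have h1 : pvS k' (d :: t) = pvS k' t := by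
        rw [pvS_cons, pvId, hid]
        have : (some k == some k') = false := by simp [Ne.symm hne]
        simp [this]
      simp only [Function.comp, pvToRec]
      rw [pvS_filter k' k hne t, h1]

-- ===== VERDICT (by name: the statement is the Claim_ definition above) =====
theorem create_combine_list_spec : Claim_equal_create_combine_list := by
  intro l _ hpre
  unfold Spec_create_combine_list create_combine_list
  have hwf : ∀ d ∈ l, ((PySem.Dict.mk d).get? "item_id").isSome ∧ ((PySem.Dict.mk d).get? "count").isSome := by
    intro d hd
    obtain ⟨h1, h2⟩ := hpre d hd
    constructor
    · rw [← PySem.Dict.contains_eq_isSome_get?]; exact h1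
    · rw [← PySem.Dict.contains_eq_isSome_get?]; exact h2
  have hA := pvFoldA l hwf PySem.Dict.empty (by simp [PySem.Dict.keys, PySem.Dict.empty])
  have hB := pvAltEq l.length l le_rfl (fun d hd => (hwf d hd).1)
  simp only [hA, hB]
  simp [PySem.Dict.empty, PySem.Dict.keys, pvToRec, List.map_map, Function.comp]
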